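-- pv_equiv track=rewrite | github.com/lihaySwiss/self.py-course | 7 - loops/7.2.7.py | arrow
-- ===== SOURCE A (Python) =====
-- def arrow(my_char, max_length):
--     pyramid = ""
--     for i in range(max_length):
--         pyramid += my_char * i
--         if(i >= 1):
--             pyramid += '\n'
--     for i in range (max_length, 0, -1):
--         pyramid += my_char * i
--         if(i > 1):
--             pyramid += '\n'
--     return pyramid
-- ===== SOURCE B (Python) =====
-- def arrow(my_char, max_length):
--     return '\n'.join(my_char * (max_length - abs(max_length - 1 - j))
--                      for j in range(2 * max_length - 1))
-- ===== Notes on version B (the rewrite author's own statement) =====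
-- stated objective: simpler
-- what changed: Replaces A's two ascending/descending accumulation loops with inline newline branches by a single pass over line indices: line width is the closed form max_length - abs(max_length - 1 - j) and the lines are joined with '\n'.
import Mathlib
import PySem

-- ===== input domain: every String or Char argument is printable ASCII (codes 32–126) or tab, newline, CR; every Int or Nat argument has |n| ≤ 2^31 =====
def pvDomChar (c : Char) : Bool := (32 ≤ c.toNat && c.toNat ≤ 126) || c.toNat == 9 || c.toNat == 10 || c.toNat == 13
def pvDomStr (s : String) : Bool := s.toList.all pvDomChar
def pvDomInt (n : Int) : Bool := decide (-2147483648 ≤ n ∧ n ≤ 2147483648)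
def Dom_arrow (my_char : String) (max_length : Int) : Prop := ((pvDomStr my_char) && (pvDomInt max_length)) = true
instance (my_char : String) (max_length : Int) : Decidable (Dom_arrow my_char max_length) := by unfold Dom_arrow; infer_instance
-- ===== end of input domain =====

-- B builds the arrow in one pass: line j has width max_length - |max_length - 1 - j|, lines joined by '\n' (simpler decomposition, same cost).

-- ===== PORT A =====
def arrow (my_char : String) (max_length : Int) : String :=
  String.ofList
    ((PySem.List.pyRange max_length 0 (-1)).foldl
      (fun pyramid i =>
        let pyramid := pyramid ++ PySem.List.pyRepeat my_char.toList i
        if i > 1 then pyramid ++ ['\n'] else pyramid)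
      ((PySem.List.pyRange 0 max_length 1).foldl
        (fun pyramid i =>
          let pyramid := pyramid ++ PySem.List.pyRepeat my_char.toList i
          if i ≥ 1 then pyramid ++ ['\n'] else pyramid)
        []))

-- ===== PORT B =====
def arrow_alt (my_char : String) (max_length : Int) : String :=
  String.ofList
    (PySem.Chars.join ['\n']
      ((PySem.List.pyRange 0 (2 * max_length - 1) 1).map
        (fun j => PySem.List.pyRepeat my_char.toList (max_length - |max_length - 1 - j|))))

-- ===== PRECONDITION & SPEC =====
def Spec_arrow (my_char : String) (max_length : Int) (out : String) : Prop := out = arrow_alt my_char max_length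
instance (my_char : String) (max_length : Int) (out : String) : Decidable (Spec_arrow my_char max_length out) := by unfold Spec_arrow; infer_instance

-- ===== CLAIM (what is proved, stated in full; the proofs are below) =====
def Claim_equal_arrow : Prop := ∀ (my_char : String) (max_length : Int), Dom_arrow my_char max_length → Spec_arrow my_char max_length (arrow my_char max_length)

-- ===== LEMMAS AND PROOFS =====

-- what A's first (ascending) loop accumulates, as a Nat recursion
def pvAsc (c : List Char) : Nat → List Char
  | 0 => []
  | k+1 =>
      let p := pvAsc c k ++ PySem.List.pyRepeat c (k : Int)
      if (k : Int) ≥ 1 then p ++ ['\n'] else p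

-- what A's second (descending) loop appends, as a Nat recursion
def pvDesc (c : List Char) : Nat → List Char
  | 0 => []
  | k+1 =>
      (if ((k : Int) + 1) > 1 then PySem.List.pyRepeat c ((k : Int) + 1) ++ ['\n']
       else PySem.List.pyRepeat c ((k : Int) + 1)) ++ pvDesc c k

def pvRep (c : List Char) (k : Nat) : List Char := PySem.List.pyRepeat c (k : Int)

-- each line followed by a newline
def pvGlue (ls : List (List Char)) : List Char := (ls.map (· ++ ['\n'])).flatten

-- lines of widths 1..n
def pvUpW (c : List Char) (n : Nat) : List (List Char) :=
  (List.range n).map (fun i => pvRep c (i + 1))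

-- lines of widths n..1
def pvDnW (c : List Char) : Nat → List (List Char)
  | 0 => []
  | k+1 => pvRep c (k + 1) :: pvDnW c k

theorem pv_asc_foldl (c : List Char) (k : Nat) :
    (PySem.List.pyRange 0 (k : Int) 1).foldl
      (fun pyramid i =>
        let pyramid := pyramid ++ PySem.List.pyRepeat c i
        if i ≥ 1 then pyramid ++ ['\n'] else pyramid) []
      = pvAsc c k := by
  induction k with
  | zero => rw [Nat.cast_zero, PySem.List.pyRange_one_eq_nil le_rfl]; rfl
  | succ k ih =>
      have hc : ((k + 1 : Nat) : Int) = (k : Int) + 1 := by push_cast; ring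
      rw [hc, PySem.List.pyRange_one_succ_right (by omega), List.foldl_append, ih]
      rfl

theorem pv_desc_foldl (c : List Char) (k : Nat) (init : List Char) :
    (PySem.List.pyRange (k : Int) 0 (-1)).foldl
      (fun pyramid i =>
        let pyramid := pyramid ++ PySem.List.pyRepeat c i
        if i > 1 then pyramid ++ ['\n'] else pyramid) init
      = init ++ pvDesc c k := by
  induction k generalizing init with
  | zero => rw [Nat.cast_zero, PySem.List.pyRange_neg_one_eq_nil le_rfl]; simp [pvDesc]
  | succ k ih =>
      have hc : ((k + 1 : Nat) : Int) = (k : Int) + 1 := by push_cast; ring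
      have hs : (k : Int) + 1 - 1 = (k : Int) := by ring
      rw [hc, PySem.List.pyRange_neg_one_cons (by omega), List.foldl_cons, hs, ih]
      simp only [pvDesc]
      split_ifs <;> simp [List.append_assoc]

theorem pv_asc_glue (c : List Char) (k : Nat) : pvAsc c (k + 1) = pvGlue (pvUpW c k) := by
  induction k with
  | zero => simp [pvAsc, pvGlue, pvUpW, PySem.List.pyRepeat]
  | succ k ih =>
      show (let p := pvAsc c (k + 1) ++ PySem.List.pyRepeat c ((k + 1 : Nat) : Int)
            if ((k + 1 : Nat) : Int) ≥ 1 then p ++ ['\n'] else p) = _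
      rw [if_pos (by omega)]
      rw [ih]
      simp [pvGlue, pvUpW, List.range_succ, pvRep, List.append_assoc]

theorem pv_desc_join (c : List Char) (k : Nat) :
    pvDesc c (k + 1) = PySem.Chars.join ['\n'] (pvDnW c (k + 1)) := by
  induction k with
  | zero =>
      simp only [pvDesc, pvDnW, PySem.Chars.join_singleton]
      rw [if_neg (by norm_num)]
      simp [pvRep]
  | succ k ih =>
      show (if (((k + 1 : Nat) : Int) + 1) > 1 then
              PySem.List.pyRepeat c (((k + 1 : Nat) : Int) + 1) ++ ['\n']
            else PySem.List.pyRepeat c (((k + 1 : Nat) : Int) + 1)) ++ pvDesc c (k + 1) = _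
      rw [if_pos (by omega), ih]
      show _ = PySem.Chars.join ['\n'] (pvRep c (k + 2) :: pvRep c (k + 1) :: pvDnW c k)
      rw [PySem.Chars.join_cons_cons]
      have : PySem.List.pyRepeat c (((k + 1 : Nat) : Int) + 1) = pvRep c (k + 2) := by
        unfold pvRep; norm_cast
      rw [this]
      simp [pvDnW, List.append_assoc]

theorem pv_glue_join (ls : List (List Char)) (m : List Char) (ms : List (List Char)) :
    pvGlue ls ++ PySem.Chars.join ['\n'] (m :: ms)
      = PySem.Chars.join ['\n'] (ls ++ m :: ms) := by
  induction ls with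
  | nil => simp [pvGlue]
  | cons l ls ih =>
      have : (l :: ls) ++ m :: ms = l :: (ls ++ m :: ms) := rfl
      rw [this]
      cases hl : ls ++ m :: ms with
      | nil => exact absurd hl (by simp)
      | cons q rest =>
          rw [PySem.Chars.join_cons_cons, ← hl, ← ih]
          simp [pvGlue, List.append_assoc]

theorem pv_dnW_map (c : List Char) (m : Nat) :
    (List.range m).map (fun j => pvRep c (m - j)) = pvDnW c m := by
  induction m with
  | zero => rfl
  | succ m ih =>
      rw [List.range_succ_eq_map, List.map_cons, List.map_map]
      simp only [Nat.sub_zero, pvDnW]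
      congr 1
      rw [← ih]
      apply List.map_congr_left
      intro j _
      simp [Function.comp, Nat.succ_sub_succ]

theorem pv_lines (c : List Char) (m : Nat) :
    (PySem.List.pyRange 0 (2 * ((m + 1 : Nat) : Int) - 1) 1).map
        (fun j => PySem.List.pyRepeat c (((m + 1 : Nat) : Int) - |((m + 1 : Nat) : Int) - 1 - j|))
      = pvUpW c (m + 1) ++ pvDnW c m := by
  have hb : 2 * ((m + 1 : Nat) : Int) - 1 = ((2 * m + 1 : Nat) : Int) := by push_cast; ring
  rw [hb, PySem.List.pyRange_one]
  have ht : (((2 * m + 1 : Nat) : Int) - 0).toNat = 2 * m + 1 := by omega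
  rw [ht, List.map_map]
  have hsplit : 2 * m + 1 = (m + 1) + m := by omega
  rw [hsplit, List.range_add, List.map_append, List.map_map]
  congr 1
  · apply List.map_congr_left
    intro k hk
    have hk' : k ≤ m := by simpa [Nat.lt_succ_iff] using hk
    simp only [Function.comp]
    have harg : ((m + 1 : Nat) : Int) - |((m + 1 : Nat) : Int) - 1 - (0 + (k : Int))| = ((k + 1 : Nat) : Int) := by
      rw [abs_of_nonneg (by omega)]; omega
    rw [harg]
    rfl
  · rw [← pv_dnW_map c m]
    apply List.map_congr_left
    intro j hj
    have hj' : j < m := List.mem_range.mp hj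
    simp only [Function.comp]
    have harg : ((m + 1 : Nat) : Int) - |((m + 1 : Nat) : Int) - 1 - (0 + ((m + 1 + j : Nat) : Int))| = ((m - j : Nat) : Int) := by
      rw [abs_of_nonpos (by omega)]; omega
    rw [harg]
    rfl

theorem pv_upW_succ (c : List Char) (m : Nat) :
    pvUpW c (m + 1) = pvUpW c m ++ [pvRep c (m + 1)] := by
  simp [pvUpW, List.range_succ]

-- ===== VERDICT (by name: the statement is the Claim_ definition above) =====
theorem arrow_spec : Claim_equal_arrow := by
  intro my_char max_length _
  unfold Spec_arrow arrow arrow_alt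
  by_cases h : max_length ≤ 0
  · rw [PySem.List.pyRange_one_eq_nil h, PySem.List.pyRange_neg_one_eq_nil h,
        PySem.List.pyRange_one_eq_nil (by omega : 2 * max_length - 1 ≤ 0)]
    simp [PySem.Chars.join_nil]
  · obtain ⟨m, rfl⟩ : ∃ m : Nat, max_length = ((m + 1 : Nat) : Int) :=
      ⟨(max_length - 1).toNat, by omega⟩
    rw [pv_asc_foldl, pv_desc_foldl, pv_lines, pv_asc_glue, pv_desc_join, pv_upW_succ]
    congr 1
    have hdn : pvDnW my_char.toList (m + 1) = pvRep my_char.toList (m + 1) :: pvDnW my_char.toList m := rfl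
    rw [hdn, pv_glue_join]
    simp [List.append_assoc]
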